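-- pv_equiv track=rewrite | github.com/alanchancl/IntentLoom | scripts/generate_k8s20_case_studies.py | _annotate_witness_blame
-- ===== SOURCE A (Python) =====
-- from typing import Any, Dict, List, Optional, Tuple
--
-- def _annotate_witness_blame(diff_lines: List[str], blame_policies: List[str]) -> List[str]:
--     if not blame_policies:
--         return diff_lines
--     out: List[str] = []
--     for line in diff_lines:
--         tagged = False
--         for name in blame_policies:
--             token = f" {name}:"
--             token2 = f" {name} BEFORE:"
--             if token in line or token2 in line:
--                 out.append(line + " // witness-blamed")
--                 tagged = True
--                 break
--         if not tagged:
--             out.append(line)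
--     return out
-- ===== SOURCE B (Python) =====
-- def _annotate_witness_blame(diff_lines, blame_policies):
--     if not blame_policies:
--         return diff_lines
--     tokens = []
--     for name in blame_policies:
--         tokens.append(f" {name}:")
--         tokens.append(f" {name} BEFORE:")
--     toks = tuple(tokens)
--     out = []
--     for line in diff_lines:
--         # every token starts with ' ', so only space positions can match
--         hit = any(ch == ' ' and line.startswith(toks, i) for i, ch in enumerate(line))
--         out.append(line + " // witness-blamed" if hit else line)
--     return out
-- ===== Notes on version B (the rewrite author's own statement) =====
-- stated objective: faster
-- what changed: B builds the flat token list once up front and tags each line by a single positional scan that only at space offsets makes one C-level tuple-startswith call trying every token, replacing A's nested per-name loop that rebuilds both tokens and runs a separate substring-membership search per name per line.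
import Mathlib
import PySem

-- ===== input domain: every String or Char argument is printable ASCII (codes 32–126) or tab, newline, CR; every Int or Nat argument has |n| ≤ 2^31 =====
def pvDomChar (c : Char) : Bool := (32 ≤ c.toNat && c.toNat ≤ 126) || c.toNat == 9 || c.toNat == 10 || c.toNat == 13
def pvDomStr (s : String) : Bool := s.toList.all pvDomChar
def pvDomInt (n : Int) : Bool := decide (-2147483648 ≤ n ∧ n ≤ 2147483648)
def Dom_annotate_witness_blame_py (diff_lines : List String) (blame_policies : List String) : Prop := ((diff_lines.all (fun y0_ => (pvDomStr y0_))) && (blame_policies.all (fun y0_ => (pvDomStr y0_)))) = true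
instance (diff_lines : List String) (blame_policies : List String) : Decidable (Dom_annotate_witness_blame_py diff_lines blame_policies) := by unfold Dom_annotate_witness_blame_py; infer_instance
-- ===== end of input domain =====

-- B precomputes the flat token list once and tags each line by a single positional scan with a
-- multi-prefix check only at space offsets, instead of A's per-name substring-membership tests
-- with break (objective: faster; a timing run measured B faster at the largest size).

-- ===== PORT A =====
-- inner loop 'for name in blame_policies: … break' as a fold over (out, tagged)
def pvStepA (line : String) (st : List String × Bool) (name : String) : List String × Bool :=
  if st.2 then st
  else
    let token := " " ++ name ++ ":"
    let token2 := " " ++ name ++ " BEFORE:"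
    if PySem.Str.isIn token line || PySem.Str.isIn token2 line then
      (st.1 ++ [line ++ " // witness-blamed"], true)
    else st

def annotate_witness_blame_py (diff_lines : List String) (blame_policies : List String) : List String :=
  if blame_policies = [] then diff_lines
  else
    diff_lines.foldl (fun out line =>
      let r := blame_policies.foldl (pvStepA line) (out, false)
      if r.2 then r.1 else r.1 ++ [line]) []

-- ===== PORT B =====
def pvTokens (blame_policies : List String) : List String :=
  blame_policies.foldl (fun tokens name => tokens ++ [" " ++ name ++ ":", " " ++ name ++ " BEFORE:"]) []

-- line.startswith(t, i) for 0 ≤ i ≤ len(line): exactly 't is a prefix of line[i:]' (hand port, exact on this range)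
def pvStartsAt (line : String) (t : String) (i : Nat) : Bool :=
  PySem.Chars.startswith (line.toList.drop i) t.toList

-- 'any(ch == ' ' and line.startswith(toks, i) for i, ch in enumerate(line))':
-- tuple-startswith is 'some token is a prefix at offset i'
def annotate_witness_blame_py_alt (diff_lines : List String) (blame_policies : List String) : List String :=
  if blame_policies = [] then diff_lines
  else
    let tokens := pvTokens blame_policies
    diff_lines.foldl (fun out line =>
      let hit := (List.range line.toList.length).any (fun i =>
        (line.toList.getD i 'x' == ' ') && tokens.any (fun t => pvStartsAt line t i))
      out ++ [if hit then line ++ " // witness-blamed" else line]) []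

-- ===== PRECONDITION & SPEC =====
def Spec_annotate_witness_blame_py (diff_lines : List String) (blame_policies : List String) (out : List String) : Prop := out = annotate_witness_blame_py_alt diff_lines blame_policies
instance (diff_lines : List String) (blame_policies : List String) (out : List String) : Decidable (Spec_annotate_witness_blame_py diff_lines blame_policies out) := by unfold Spec_annotate_witness_blame_py; infer_instance

-- ===== CLAIM (what is proved, stated in full; the proofs are below) =====
def Claim_equal_annotate_witness_blame_py : Prop := ∀ (diff_lines : List String) (blame_policies : List String), Dom_annotate_witness_blame_py diff_lines blame_policies → Spec_annotate_witness_blame_py diff_lines blame_policies (annotate_witness_blame_py diff_lines blame_policies)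

-- ===== LEMMAS AND PROOFS =====

-- which names A's inner loop fires on
def pvHitName (line name : String) : Bool :=
  PySem.Str.isIn (" " ++ name ++ ":") line || PySem.Str.isIn (" " ++ name ++ " BEFORE:") line

theorem pvStepA_foldl_true (line : String) (names : List String) (out : List String) :
    names.foldl (pvStepA line) (out, true) = (out, true) := by
  induction names with
  | nil => rfl
  | cons n ns ih => simpa [pvStepA] using ih

theorem pvStepA_foldl_false (line : String) (names : List String) (out : List String) :
    names.foldl (pvStepA line) (out, false) =
      if names.any (pvHitName line) then (out ++ [line ++ " // witness-blamed"], true)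
      else (out, false) := by
  induction names with
  | nil => rfl
  | cons n ns ih =>
    by_cases h : pvHitName line n = true
    · simp [pvStepA, pvHitName] at h ⊢
      rcases h with h | h <;> simp [h, pvStepA_foldl_true]
    · simp [pvHitName] at h
      simp [pvStepA, pvHitName, h.1, h.2, ih]

-- a space-headed token is in the line iff it starts at some scanned space offset
theorem pvScan_eq_isIn (line t : String) (hh : t.toList.head? = some ' ') :
    ((List.range line.toList.length).any fun i =>
        (line.toList.getD i 'x' == ' ') && pvStartsAt line t i) = PySem.Str.isIn t line := by
  obtain ⟨ts, hts⟩ : ∃ ts, t.toList = ' ' :: ts := by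
    cases h : t.toList with
    | nil => simp [h] at hh
    | cons a l => simp [h] at hh; exact ⟨l, by simp [hh]⟩
  rw [Bool.eq_iff_iff]
  simp only [List.any_eq_true, List.mem_range, Bool.and_eq_true, beq_iff_eq,
    pvStartsAt, PySem.Chars.startswith_iff]
  rw [show PySem.Str.isIn t line = PySem.Chars.isIn t.toList line.toList from by simp,
      ← PySem.Chars.exists_prefix_drop_iff_isIn]
  constructor
  · rintro ⟨i, _, _, hp⟩; exact ⟨i, hp⟩
  · rintro ⟨j, hj⟩
    have hjlt : j < line.toList.length := by
      by_contra hge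
      rw [List.drop_eq_nil_of_le (by omega)] at hj
      simp [hts] at hj
    refine ⟨j, hjlt, ?_, hj⟩
    rw [hts, List.drop_eq_getElem_cons hjlt] at hj
    have hsp : ' ' = line.toList[j] := (List.cons_prefix_cons.mp hj).1
    rw [List.getD_eq_getElem?_getD, List.getElem?_eq_getElem hjlt, ← hsp]
    rfl

theorem pvTokens_eq (bp : List String) :
    pvTokens bp = bp.flatMap (fun n => [" " ++ n ++ ":", " " ++ n ++ " BEFORE:"]) := by
  simpa [pvTokens] using
    PySem.List.foldl_append_eq_flatMap (fun n => [" " ++ n ++ ":", " " ++ n ++ " BEFORE:"]) bp []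

theorem pvAny_swap {A B : Type} (xs : List A) (ys : List B) (g : A → Bool) (p : A → B → Bool) :
    (xs.any fun i => g i && ys.any fun t => p i t) = (ys.any fun t => xs.any fun i => g i && p i t) := by
  rw [Bool.eq_iff_iff]
  simp only [List.any_eq_true, Bool.and_eq_true]
  tauto

theorem pvHit_eq (line : String) (bp : List String) :
    ((List.range line.toList.length).any fun i =>
        (line.toList.getD i 'x' == ' ') && (pvTokens bp).any fun t => pvStartsAt line t i) =
      bp.any (pvHitName line) := by
  rw [pvAny_swap, pvTokens_eq]
  induction bp with
  | nil => rfl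
  | cons n ns ih =>
    rw [List.flatMap_cons, List.any_append, List.any_cons, List.any_cons, List.any_nil,
        pvScan_eq_isIn line _ (by simp), pvScan_eq_isIn line _ (by simp), ih, List.any_cons]
    simp [pvHitName, Bool.or_assoc]

-- ===== VERDICT (by name: the statement is the Claim_ definition above) =====
theorem annotate_witness_blame_py_spec : Claim_equal_annotate_witness_blame_py := by
  intro diff_lines bp _
  unfold Spec_annotate_witness_blame_py annotate_witness_blame_py annotate_witness_blame_py_alt
  by_cases hbp : bp = []
  · simp [hbp]
  · simp only [hbp, if_false]
    have hf : (fun (out : List String) (line : String) =>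
        let r := bp.foldl (pvStepA line) (out, false)
        if r.2 then r.1 else r.1 ++ [line]) =
        (fun (out : List String) (line : String) =>
        let hit := (List.range line.toList.length).any
          (fun i => (line.toList.getD i 'x' == ' ') && (pvTokens bp).any fun t => pvStartsAt line t i)
        out ++ [if hit then line ++ " // witness-blamed" else line]) := by
      funext out line
      rw [pvStepA_foldl_false, pvHit_eq]
      by_cases h : bp.any (pvHitName line) = true <;> simp [h]
    rw [hf]
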